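-- pv_equiv track=rewrite | github.com/otherland/python-challenges | ladybugs.py | solution
-- ===== SOURCE A (Python) =====
-- from collections import Counter
--
-- def solution(board):
--     cells = [0] + [i for i in board if i.isalpha()] + [0]
--     c = Counter(cells)
--     if any(i < 2 for i in c.values()):
--         return "NO"
--     for i in range(1, len(cells)-1):
--         if (cells[i-1] != cells[i]) and (cells[i] != cells[i+1]):
--             if not "_" in board:
--                 return "NO"
--     return "YES"
-- ===== SOURCE B (Python) =====
-- def solution(board):
--     letters = [x for x in board if x.isalpha()]
--     counts = {}
--     for x in letters:
--         counts[x] = counts.get(x, 0) + 1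
--     if any(v < 2 for v in counts.values()):
--         return "NO"
--     has_singleton = False
--     i, n = 0, len(letters)
--     while i < n:
--         j = i + 1
--         while j < n and letters[j] == letters[i]:
--             j += 1
--         if j - i == 1:
--             has_singleton = True
--         i = j
--     if has_singleton and "_" not in board:
--         return "NO"
--     return "YES"
-- ===== Notes on version B (the rewrite author's own statement) =====
-- stated objective: alternative
-- what changed: Replaces A's sentinel-padded list, Counter over it, and index loop comparing both neighbours with a dict count over the letter list plus a single run-length scan that flags singleton runs.
import Mathlib
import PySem

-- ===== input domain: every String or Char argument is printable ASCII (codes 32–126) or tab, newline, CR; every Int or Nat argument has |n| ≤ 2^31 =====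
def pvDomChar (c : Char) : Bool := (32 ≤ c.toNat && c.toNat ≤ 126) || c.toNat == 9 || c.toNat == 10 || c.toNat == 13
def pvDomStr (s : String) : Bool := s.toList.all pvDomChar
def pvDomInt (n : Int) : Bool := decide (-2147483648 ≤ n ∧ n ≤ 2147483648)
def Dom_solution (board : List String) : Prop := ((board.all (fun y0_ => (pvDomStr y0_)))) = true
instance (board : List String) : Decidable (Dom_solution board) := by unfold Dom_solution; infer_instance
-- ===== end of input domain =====

-- B replaces A's sentinel-padded neighbour-index scan by a run-length scan over the
-- letter list (a different decomposition; objective: alternative, no speed claim).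

-- ===== PORT A =====
-- the loop condition: cells[i-1] != cells[i] and cells[i] != cells[i+1]
def solutionCond (cells : List (Option String)) (i : Int) : Bool :=
  decide (PySem.List.pyGet? cells (i-1) ≠ PySem.List.pyGet? cells i) &&
  decide (PySem.List.pyGet? cells i ≠ PySem.List.pyGet? cells (i+1))

-- for i in range(1, len(cells)-1): …  (early return "NO")
def solutionLoop (cells : List (Option String)) (board : List String) : List Int → String
  | [] => "YES"
  | i :: is =>
      if solutionCond cells i then
        if !(board.contains "_") then "NO"
        else solutionLoop cells board is
      else solutionLoop cells board is

def solution (board : List String) : String :=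
  -- the sentinel 0 is modelled as `none` (0 compares unequal to every string, as none does)
  let cells : List (Option String) :=
    [none] ++ (board.filter (fun s => PySem.Str.strIsalpha s)).map some ++ [none]
  let c := PySem.Dict.counter cells
  if c.values.any (fun v => decide (v < 2)) then "NO"
  else solutionLoop cells board (PySem.List.pyRange 1 ((cells.length : Int) - 1) 1)

-- ===== PORT B =====
-- the outer while loop of Source B: scan run by run, flag any run of length 1
def runScan (letters : List String) : Bool :=
  match letters with
  | [] => false
  | x :: rest =>
      (((rest.takeWhile (fun y => y == x)).length == 0) : Bool) ||
      runScan (rest.dropWhile (fun y => y == x))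
termination_by letters.length
decreasing_by
  simp only [List.length_cons]
  exact Nat.lt_succ_of_le (List.length_dropWhile_le _ _)

def solution_alt (board : List String) : String :=
  let letters := board.filter (fun s => PySem.Str.strIsalpha s)
  let counts := letters.foldl (fun d x => d.insert x (d.getD x 0 + 1))
      (PySem.Dict.empty : PySem.Dict String Int)
  if counts.values.any (fun v => decide (v < 2)) then "NO"
  else if runScan letters && !(board.contains "_") then "NO" else "YES"

-- ===== PRECONDITION & SPEC =====
def Spec_solution (board : List String) (out : String) : Prop := out = solution_alt board
instance (board : List String) (out : String) : Decidable (Spec_solution board out) := by unfold Spec_solution; infer_instance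

-- ===== CLAIM (what is proved, stated in full; the proofs are below) =====
def Claim_equal_solution : Prop := ∀ (board : List String), Dom_solution board → Spec_solution board (solution board)

-- ===== LEMMAS AND PROOFS =====

-- Counter part: the sentinel key `none` has count 2, so it never triggers the "< 2" test.
lemma values_counter_eq {α : Type} [BEq α] [LawfulBEq α] (xs : List α) :
    (PySem.Dict.counter xs).values = (PySem.Set.ofList xs).map (fun k => ((xs.count k : Int))) := by
  simp [PySem.Dict.values, PySem.Dict.items_counter]

lemma count_cells_some (letters : List String) (x : String) :
    (none :: (letters.map some ++ [none]) : List (Option String)).count (some x) = letters.count x := by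
  simp [List.count_append]
  exact List.count_map_of_injective letters some (Option.some_injective _) x

lemma count_cells_none (letters : List String) :
    (none :: (letters.map some ++ [none]) : List (Option String)).count none = 2 := by
  simp [List.count_append, List.count_eq_zero]

lemma counter_values_any (letters : List String) :
    ((PySem.Dict.counter (none :: (letters.map some ++ [none]))).values.any (fun v => decide (v < 2)))
    = ((PySem.Dict.counter letters).values.any (fun v => decide (v < 2))) := by
  rw [values_counter_eq, values_counter_eq, Bool.eq_iff_iff]
  simp only [List.any_map, List.any_eq_true, Function.comp, decide_eq_true_eq]
  constructor
  · rintro ⟨k, hk, hlt⟩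
    have hk' := (PySem.Set.mem_ofList _ _).mp hk
    match k with
    | none =>
        rw [count_cells_none] at hlt; norm_num at hlt
    | some x =>
        have hx : x ∈ letters := by simpa using hk'
        refine ⟨x, (PySem.Set.mem_ofList _ _).mpr hx, ?_⟩
        rw [count_cells_some] at hlt; exact hlt
  · rintro ⟨x, hx, hlt⟩
    have hx' : x ∈ letters := (PySem.Set.mem_ofList _ _).mp hx
    refine ⟨some x, (PySem.Set.mem_ofList _ _).mpr (by simp [hx']), ?_⟩
    rw [count_cells_some]; exact hlt

-- hasIsoTriple L: some window of three consecutive cells has a middle differing from both neighbours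
def hasIsoTriple : List (Option String) → Bool
  | a :: b :: c :: rest => (decide (a ≠ b) && decide (b ≠ c)) || hasIsoTriple (b :: c :: rest)
  | _ => false

lemma hasIsoTriple_short (L : List (Option String)) (h : L.length ≤ 2) : hasIsoTriple L = false := by
  match L, h with
  | [], _ => rfl
  | [_], _ => rfl
  | [_, _], _ => rfl

lemma hasIsoTriple_dup (a : Option String) (l : List (Option String)) :
    hasIsoTriple (a :: a :: l) = hasIsoTriple (a :: l) := by
  cases l with
  | nil => rfl
  | cons c rest => simp [hasIsoTriple]

lemma cond_at (cells : List (Option String)) (k : Nat) (h2 : k + 2 < cells.length) :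
    solutionCond cells ((k : Int) + 1)
      = (decide (cells[k] ≠ cells[k+1]) && decide (cells[k+1] ≠ cells[k+2])) := by
  have e0 : ((k : Int) + 1 - 1) = ((k : Nat) : Int) := by ring
  have e1 : ((k : Int) + 1) = (((k + 1 : Nat)) : Int) := by push_cast; ring
  have e2 : ((k : Int) + 1 + 1) = (((k + 2 : Nat)) : Int) := by push_cast; ring
  unfold solutionCond
  rw [e0, e2, e1, PySem.List.pyGet?_natCast, PySem.List.pyGet?_natCast, PySem.List.pyGet?_natCast,
    List.getElem?_eq_getElem (by omega), List.getElem?_eq_getElem (by omega),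
    List.getElem?_eq_getElem h2]
  simp

lemma range_any_eq_hasIsoTriple (cells : List (Option String)) :
    ∀ (m k : Nat), cells.length - k = m →
    ((PySem.List.pyRange ((k : Int) + 1) ((cells.length : Int) - 1) 1).any (solutionCond cells))
      = hasIsoTriple (cells.drop k) := by
  intro m
  induction m with
  | zero =>
      intro k hk
      rw [PySem.List.pyRange_one_eq_nil (by omega)]
      rw [List.drop_eq_nil_of_le (by omega)]
      rfl
  | succ m ih =>
      intro k hk
      by_cases hbig : cells.length ≤ k + 2
      · rw [PySem.List.pyRange_one_eq_nil (by omega)]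
        rw [hasIsoTriple_short _ (by simp; omega)]
        rfl
      · replace hbig : k + 2 < cells.length := by omega
        have hk0 : k < cells.length := by omega
        have hk1 : k + 1 < cells.length := by omega
        have hd0 : cells.drop k = cells[k] :: cells.drop (k+1) := (List.getElem_cons_drop hk0).symm
        have hd1 : cells.drop (k+1) = cells[k+1] :: cells.drop (k+2) := (List.getElem_cons_drop hk1).symm
        have hd2 : cells.drop (k+2) = cells[k+2] :: cells.drop (k+3) := (List.getElem_cons_drop hbig).symm
        rw [PySem.List.pyRange_one_cons (by omega), List.any_cons]
        have ihr := ih (k+1) (by omega)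
        have ecast : ((k : Int) + 1 + 1) = (((k + 1 : Nat)) : Int) + 1 := by push_cast; ring
        rw [ecast, ihr, cond_at cells k hbig]
        rw [hd0, hd1, hd2]
        simp [hasIsoTriple]

lemma hasIsoTriple_cons_same (p a : Option String) (l : List (Option String)) :
    hasIsoTriple (p :: a :: a :: l) = hasIsoTriple (a :: l) := by
  simp [hasIsoTriple, hasIsoTriple_dup]

lemma hasIso_strip : ∀ (t : List String) (d : List String) (x : String), (∀ y ∈ t, y = x) →
    hasIsoTriple (some x :: ((t ++ d).map some ++ [none]))
      = hasIsoTriple (some x :: (d.map some ++ [none])) := by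
  intro t
  induction t with
  | nil => intro d x _; rfl
  | cons y t ih =>
      intro d x hall
      have hy : y = x := hall y (by simp)
      subst hy
      have hrest := ih d y (fun z hz => hall z (by simp [hz]))
      calc hasIsoTriple (some y :: (((y :: t) ++ d).map some ++ [none]))
          = hasIsoTriple (some y :: some y :: some y :: ((t ++ d).map some ++ [none])) := by
            rw [hasIsoTriple_dup]; simp
        _ = hasIsoTriple (some y :: ((t ++ d).map some ++ [none])) := hasIsoTriple_cons_same _ _ _
        _ = hasIsoTriple (some y :: (d.map some ++ [none])) := hrest

lemma head_dropWhile {α : Type} (p : α → Bool) :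
    ∀ (l : List α) (z : α) (zs : List α), l.dropWhile p = z :: zs → p z = false := by
  intro l
  induction l with
  | nil => intro z zs h; simp [List.dropWhile] at h
  | cons a l ih =>
      intro z zs h
      by_cases hp : p a = true
      · rw [List.dropWhile_cons_of_pos hp] at h; exact ih z zs h
      · rw [List.dropWhile_cons_of_neg hp] at h
        cases h; simpa using hp

lemma hasIso_eq_runScan : ∀ (n : Nat) (letters : List String) (prev : Option String),
    letters.length ≤ n →
    (∀ x, letters.head? = some x → prev ≠ some x) →
    hasIsoTriple (prev :: (letters.map some ++ [none])) = runScan letters := by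
  intro n
  induction n with
  | zero =>
      intro letters prev hlen _
      have : letters = [] := List.eq_nil_of_length_eq_zero (by omega)
      subst this; simp [runScan, hasIsoTriple]
  | succ n ih =>
      intro letters prev hlen hprev
      match letters with
      | [] => simp [runScan, hasIsoTriple]
      | x :: rest =>
          have hpx : prev ≠ some x := hprev x rfl
          rcases ht : rest.takeWhile (fun y => y == x) with _ | ⟨y, t'⟩
          · have hrs : runScan (x :: rest) = true := by
              rw [runScan]; rw [ht]; simp
            rw [hrs]
            cases rest with
            | nil => simp [hasIsoTriple, hpx]
            | cons z r' =>
                have hz : (z == x) = false := by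
                  by_cases hzz : (z == x) = true
                  · rw [List.takeWhile_cons] at ht; rw [if_pos hzz] at ht; simp at ht
                  · simpa using hzz
                have hzx : z ≠ x := by simpa using hz
                simp [hasIsoTriple, hpx]
                exact Or.inl (Ne.symm hzx)
          · have hy : (y == x) = true := by
              have hmem : y ∈ rest.takeWhile (fun w => w == x) := by
                rw [ht]; exact List.mem_cons_self
              exact List.mem_takeWhile_imp (p := fun w => w == x) hmem
            have hyx : y = x := by simpa using hy
            subst hyx
            have hsplit : rest = (y :: t') ++ rest.dropWhile (fun z => z == y) := by
              conv_lhs => rw [← List.takeWhile_append_dropWhile (p := fun z => z == y) (l := rest)]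
              rw [ht]
            have ht'all : ∀ z ∈ t', z = y := by
              intro z hz
              have hmem : z ∈ rest.takeWhile (fun w => w == y) := by
                rw [ht]; exact List.mem_cons_of_mem _ hz
              simpa using List.mem_takeWhile_imp (p := fun w => w == y) hmem
            have hdlen : (rest.dropWhile (fun z => z == y)).length ≤ n := by
              have h1 : (rest.dropWhile (fun z => z == y)).length ≤ rest.length :=
                List.length_dropWhile_le _ _
              simp only [List.length_cons] at hlen; omega
            have hdhead : ∀ z, (rest.dropWhile (fun w => w == y)).head? = some z →
                (some y : Option String) ≠ some z := by
              intro z hz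
              cases hdc : rest.dropWhile (fun w => w == y) with
              | nil => rw [hdc] at hz; cases hz
              | cons a as =>
                  rw [hdc] at hz
                  have hnz := head_dropWhile (fun w => w == y) rest a as hdc
                  simp only [beq_eq_false_iff_ne] at hnz
                  have ha : a = z := by simpa using hz
                  subst ha
                  simpa using Ne.symm hnz
            have hih := ih (rest.dropWhile (fun z => z == y)) (some y) hdlen hdhead
            have hrs : runScan (y :: rest) = runScan (rest.dropWhile (fun z => z == y)) := by
              rw [runScan]; rw [ht]; simp
            rw [hrs]
            calc hasIsoTriple (prev :: ((y :: rest).map some ++ [none]))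
                = hasIsoTriple (prev :: some y :: some y ::
                    ((t' ++ rest.dropWhile (fun z => z == y)).map some ++ [none])) := by
                  conv_lhs => rw [hsplit]
                  simp
              _ = hasIsoTriple (some y ::
                    ((t' ++ rest.dropWhile (fun z => z == y)).map some ++ [none])) :=
                  hasIsoTriple_cons_same _ _ _
              _ = hasIsoTriple (some y ::
                    ((rest.dropWhile (fun z => z == y)).map some ++ [none])) :=
                  hasIso_strip t' _ y ht'all
              _ = runScan (rest.dropWhile (fun z => z == y)) := hih

lemma loop_yes (cells : List (Option String)) (board : List String)
    (h : board.contains "_" = true) :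
    ∀ is, solutionLoop cells board is = "YES" := by
  intro is
  induction is with
  | nil => rfl
  | cons i is ih =>
      have hm : "_" ∈ board := by simpa using h
      simp [solutionLoop, ih, hm]

lemma loop_no (cells : List (Option String)) (board : List String)
    (h : board.contains "_" = false) :
    ∀ is, solutionLoop cells board is = if is.any (solutionCond cells) then "NO" else "YES" := by
  intro is
  induction is with
  | nil => rfl
  | cons i is ih =>
      have hm : ¬ ("_" ∈ board) := by simpa using h
      by_cases hc : solutionCond cells i = true
      · simp [solutionLoop, hc, hm]
      · simp [solutionLoop, hc, ih]

-- ===== VERDICT (by name: the statement is the Claim_ definition above) =====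
theorem solution_spec : Claim_equal_solution := by
  intro board _
  unfold Spec_solution solution solution_alt
  dsimp only
  rw [PySem.Dict.foldl_insert_getD_add_one_eq_counter]
  have hc : (([none] ++ (board.filter (fun s => PySem.Str.strIsalpha s)).map some ++ [none]) : List (Option String))
      = (none :: ((board.filter (fun s => PySem.Str.strIsalpha s)).map some ++ [none])) := by simp
  rw [hc, counter_values_any]
  by_cases hcv : ((PySem.Dict.counter (board.filter (fun s => PySem.Str.strIsalpha s))).values.any (fun v => decide (v < 2))) = true
  · rw [if_pos hcv, if_pos hcv]
  · rw [if_neg hcv, if_neg hcv]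
    have hrange := range_any_eq_hasIsoTriple
      (none :: ((board.filter (fun s => PySem.Str.strIsalpha s)).map some ++ [none]))
      ((none :: ((board.filter (fun s => PySem.Str.strIsalpha s)).map some ++ [none])).length) 0 rfl
    rw [List.drop_zero] at hrange
    simp only [Nat.cast_zero, zero_add] at hrange
    have hiso := hasIso_eq_runScan (board.filter (fun s => PySem.Str.strIsalpha s)).length
      (board.filter (fun s => PySem.Str.strIsalpha s)) none (le_refl _) (by intro x _; simp)
    by_cases hb : board.contains "_" = true
    · rw [loop_yes _ _ hb]
      have hm : "_" ∈ board := by simpa using hb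
      simp [hm]
    · have hb' : board.contains "_" = false := by simpa using hb
      rw [loop_no _ _ hb', hrange, hiso, hb']
      simp
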